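-- pv_equiv track=rewrite | github.com/nuuuwan/lk_fisheries | src/fish/CommonMixin.py | clean_description_for_time
-- ===== SOURCE A (Python) =====
-- def clean_description_for_time(description: str) -> str:
--     x = description
--
--     x = x.replace("\xa0", " ")
--
--     for phrase in ["[", "(", "PROVISIONAL", "EXCEL"]:
--         if phrase in x:
--             x = x.split(phrase)[0]
--
--     x = x.strip()
--     return x
-- ===== SOURCE B (Python) =====
-- def clean_description_for_time(description: str) -> str:
--     x = description.replace("\xa0", " ")
--     out = []
--     for i in range(len(x)):
--         if x.startswith(("[", "(", "PROVISIONAL", "EXCEL"), i):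
--             break
--         out.append(x[i])
--     return "".join(out).strip()
-- ===== Notes on version B (the rewrite author's own statement) =====
-- stated objective: alternative
-- what changed: A repeatedly re-splits the string once per marker phrase (four split-and-truncate passes whose later searches run on already-truncated text); B makes a single left-to-right scan and cuts at the first position where any of the four marker phrases starts, which is equivalent because no marker phrase overlaps an occurrence of another.
import Mathlib
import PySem

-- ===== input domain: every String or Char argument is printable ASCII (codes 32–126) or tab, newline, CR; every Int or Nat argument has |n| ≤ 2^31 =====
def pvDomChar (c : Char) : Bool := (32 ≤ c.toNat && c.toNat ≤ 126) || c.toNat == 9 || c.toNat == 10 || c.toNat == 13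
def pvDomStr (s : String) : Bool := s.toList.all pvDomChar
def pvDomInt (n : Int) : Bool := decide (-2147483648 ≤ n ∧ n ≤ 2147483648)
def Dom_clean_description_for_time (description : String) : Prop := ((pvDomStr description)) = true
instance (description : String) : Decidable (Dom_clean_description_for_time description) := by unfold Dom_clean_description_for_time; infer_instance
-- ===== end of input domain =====

-- B replaces A's four sequential split-and-truncate passes by a single left-to-right scan that
-- stops at the first position where any marker phrase starts (objective: alternative decomposition).

-- ===== PORT A =====
-- one step of A's 'for phrase in …' loop: 'if phrase in x: x = x.split(phrase)[0]'
-- (str.split with a nonempty separator always returns a nonempty list, so '[0]' is its head)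
def pvAStep (x : List Char) (phrase : List Char) : List Char :=
  if PySem.Chars.isIn phrase x then (PySem.Chars.splitOn x phrase).headD [] else x

def clean_description_for_time (description : String) : String :=
  let x := PySem.Chars.replace description.toList ['\u00A0'] [' ']
  let x := [['['], ['('], "PROVISIONAL".toList, "EXCEL".toList].foldl pvAStep x
  String.ofList (PySem.Chars.strip x)

-- ===== PORT B =====
-- B's scan: 'for i in range(len(x)): if x.startswith(("[","(","PROVISIONAL","EXCEL"), i): break; out.append(x[i])'
-- transcribed as structural recursion over the suffix x[i:]
def pvBGo (x : List Char) : List Char :=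
  match x with
  | [] => []
  | c :: r =>
      if ['['].isPrefixOf (c :: r) || ['('].isPrefixOf (c :: r)
         || "PROVISIONAL".toList.isPrefixOf (c :: r) || "EXCEL".toList.isPrefixOf (c :: r) then []
      else c :: pvBGo r

def clean_description_for_time_alt (description : String) : String :=
  let x := PySem.Chars.replace description.toList ['\u00A0'] [' ']
  String.ofList (PySem.Chars.strip (pvBGo x))

-- ===== PRECONDITION & SPEC =====
def Spec_clean_description_for_time (description : String) (out : String) : Prop := out = clean_description_for_time_alt description
instance (description : String) (out : String) : Decidable (Spec_clean_description_for_time description out) := by unfold Spec_clean_description_for_time; infer_instance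

-- ===== CLAIM (what is proved, stated in full; the proofs are below) =====
def Claim_equal_clean_description_for_time : Prop := ∀ (description : String), Dom_clean_description_for_time description → Spec_clean_description_for_time description (clean_description_for_time description)

-- ===== LEMMAS AND PROOFS =====

def pvTrunc (sep : List Char) : List Char → List Char
  | [] => []
  | c :: r => if sep.isPrefixOf (c :: r) then [] else c :: pvTrunc sep r

theorem pvSplitOn_go_head (sep : List Char) (hsep : sep ≠ []) :
    ∀ (fuel : Nat) (l cur : List Char) (accs : List (List Char)), l.length < fuel →
      ∃ rest, PySem.Chars.splitOn.go sep fuel l cur accs = accs.reverse ++ (cur.reverse ++ pvTrunc sep l) :: rest := by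
  intro fuel
  induction fuel with
  | zero => intro l cur accs h; omega
  | succ n ih =>
      intro l cur accs h
      match l with
      | [] => exact ⟨[], by simp [PySem.Chars.splitOn.go, pvTrunc]⟩
      | c :: r =>
          rw [PySem.Chars.splitOn.go]
          by_cases hp : sep.isPrefixOf (c :: r)
          · rw [if_pos hp]
            have hsl : 0 < sep.length := List.length_pos_of_ne_nil hsep
            have hlen : (List.drop sep.length (c :: r)).length < n := by
              simp only [List.length_drop, List.length_cons] at *
              omega
            obtain ⟨r2, hr2⟩ := ih (List.drop sep.length (c :: r)) [] (cur.reverse :: accs) hlen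
            refine ⟨pvTrunc sep (List.drop sep.length (c :: r)) :: r2, ?_⟩
            rw [hr2]
            simp [pvTrunc, hp]
          · rw [if_neg hp]
            have hlen : r.length < n := by simp at h; omega
            obtain ⟨r2, hr2⟩ := ih r (c :: cur) accs hlen
            refine ⟨r2, ?_⟩
            rw [hr2]
            simp [pvTrunc, hp]


theorem pvTrunc_prefix (sep l : List Char) : pvTrunc sep l <+: l := by
  induction l with
  | nil => simp [pvTrunc]
  | cons c r ih =>
      simp only [pvTrunc]
      split
      · exact List.nil_prefix
      · exact (List.prefix_cons_inj c).mpr ih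

theorem pvTrunc_of_not_infix (sep l : List Char) (h : ¬ sep <:+: l) : pvTrunc sep l = l := by
  induction l with
  | nil => rfl
  | cons c r ih =>
      simp only [pvTrunc]
      rw [if_neg, ih]
      · intro hinf; exact h (List.IsInfix.trans hinf (List.infix_cons (List.infix_refl r)))
      · intro hp; exact h ((List.isPrefixOf_iff_prefix.mp hp).isInfix)

theorem pvAStep_eq_trunc (x p : List Char) (hp : p ≠ []) : pvAStep x p = pvTrunc p x := by
  unfold pvAStep
  by_cases hin : PySem.Chars.isIn p x
  · rw [if_pos hin]
    obtain ⟨rest, hrest⟩ := pvSplitOn_go_head p hp (x.length + 1) x [] [] (by omega)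
    unfold PySem.Chars.splitOn
    rw [hrest]
    simp
  · rw [if_neg hin]
    exact (pvTrunc_of_not_infix p x ((PySem.Chars.isIn_eq_false_iff p x).mp (by simpa using hin))).symm


def pvGood (c : Char) : Bool := c != '[' && c != '('

theorem pvTrunc_brackets (l : List Char) :
    pvTrunc ['('] (pvTrunc ['['] l) = l.takeWhile pvGood := by
  induction l with
  | nil => rfl
  | cons c r ih =>
      by_cases h1 : c = '['
      · subst h1; simp [pvTrunc, List.isPrefixOf, List.takeWhile, pvGood]
      · by_cases h2 : c = '('
        · subst h2; simp [pvTrunc, List.isPrefixOf, List.takeWhile, pvGood]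
        · have b1 : ('[' == c) = false := beq_eq_false_iff_ne.mpr (Ne.symm h1)
          have b2 : ('(' == c) = false := beq_eq_false_iff_ne.mpr (Ne.symm h2)
          have g : pvGood c = true := by simp [pvGood, h1, h2]
          simp [pvTrunc, List.isPrefixOf, b1, b2, g, ih]

theorem pvPrefix_takeWhile (q : Char → Bool) (p l : List Char) (hq : ∀ c ∈ p, q c = true) :
    p <+: l.takeWhile q ↔ p <+: l := by
  induction p generalizing l with
  | nil => simp
  | cons d p' ih =>
      cases l with
      | nil => simp [List.takeWhile]
      | cons c r =>
          by_cases hc : q c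
          · simp only [List.takeWhile_cons_of_pos hc, List.cons_prefix_cons]
            exact and_congr_right fun _ => ih r (fun x hx => hq x (List.mem_cons_of_mem d hx))
          · simp only [List.takeWhile_cons_of_neg hc]
            constructor
            · intro h; exact absurd h (by simp)
            · intro h
              obtain ⟨hdc, -⟩ := List.cons_prefix_cons.mp h
              exact absurd (hdc ▸ hq d (List.mem_cons_self)) (by simpa using hc)

theorem pvPrefix_trunc (sep p l : List Char) (h1 : p <+: l)
    (h2 : ∀ i < p.length, ¬ sep <+: l.drop i) : p <+: pvTrunc sep l := by
  induction p generalizing l with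
  | nil => simp
  | cons d p' ih =>
      cases l with
      | nil => exact absurd h1 (by simp)
      | cons c r =>
          obtain ⟨hdc, hpr⟩ := List.cons_prefix_cons.mp h1
          have hnp : ¬ sep.isPrefixOf (c :: r) := by
            intro hb
            exact h2 0 (by simp) (by simpa using List.isPrefixOf_iff_prefix.mp hb)
          simp only [pvTrunc, if_neg hnp, List.cons_prefix_cons]
          refine ⟨hdc, ih r hpr fun i hi => ?_⟩
          have := h2 (i + 1) (by simpa using hi)
          simpa using this

theorem pvTrunc_eq_nil_of_prefix (sep l : List Char) (h : sep <+: l) :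
    pvTrunc sep l = [] := by
  cases l with
  | nil => rfl
  | cons c r => simp [pvTrunc, List.isPrefixOf_iff_prefix.mpr h]

set_option maxRecDepth 100000 in
theorem pvPL_eq : "PROVISIONAL".toList = ['P','R','O','V','I','S','I','O','N','A','L'] := rfl

set_option maxRecDepth 100000 in
theorem pvEL_eq : "EXCEL".toList = ['E','X','C','E','L'] := rfl

theorem pvGoodPL : ∀ ch ∈ ['P','R','O','V','I','S','I','O','N','A','L'], pvGood ch = true := by
  intro ch hch
  simp only [List.mem_cons, List.not_mem_nil, or_false] at hch
  rcases hch with rfl|rfl|rfl|rfl|rfl|rfl|rfl|rfl|rfl|rfl|rfl <;> rfl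

theorem pvGoodEL : ∀ ch ∈ ['E','X','C','E','L'], pvGood ch = true := by
  intro ch hch
  simp only [List.mem_cons, List.not_mem_nil, or_false] at hch
  rcases hch with rfl|rfl|rfl|rfl|rfl <;> rfl

theorem pvBGo_cons (c : Char) (r : List Char) :
    pvBGo (c :: r) =
      if ['['].isPrefixOf (c :: r) || ['('].isPrefixOf (c :: r)
         || ['P','R','O','V','I','S','I','O','N','A','L'].isPrefixOf (c :: r)
         || ['E','X','C','E','L'].isPrefixOf (c :: r) then []
      else c :: pvBGo r := by
  rw [pvBGo, pvPL_eq, pvEL_eq]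

theorem pvBGo_eq (l : List Char) :
    pvBGo l = pvTrunc "EXCEL".toList (pvTrunc "PROVISIONAL".toList (pvTrunc ['('] (pvTrunc ['['] l))) := by
  rw [pvTrunc_brackets, pvPL_eq, pvEL_eq]
  induction l with
  | nil => rfl
  | cons c r ih =>
      by_cases hbr : c = '[' ∨ c = '('
      · have ht : List.takeWhile pvGood (c :: r) = [] := by
          have g : pvGood c = false := by rcases hbr with h | h <;> simp [pvGood, h]
          simp [g]
        have hb : pvBGo (c :: r) = [] := by
          rw [pvBGo_cons, if_pos]
          rcases hbr with h | h <;> subst h <;> simp [List.isPrefixOf]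
        rw [ht, hb]; rfl
      · rw [not_or] at hbr
        have g : pvGood c = true := by simp [pvGood, hbr.1, hbr.2]
        have htw : List.takeWhile pvGood (c :: r) = c :: List.takeWhile pvGood r :=
          List.takeWhile_cons_of_pos g
        by_cases hP : ['P','R','O','V','I','S','I','O','N','A','L'] <+: (c :: r)
        · have hPw : ['P','R','O','V','I','S','I','O','N','A','L'] <+: List.takeWhile pvGood (c :: r) :=
            (pvPrefix_takeWhile pvGood _ _ pvGoodPL).mpr hP
          rw [pvTrunc_eq_nil_of_prefix _ _ hPw]
          have hb : pvBGo (c :: r) = [] := by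
            rw [pvBGo_cons, if_pos]
            simp [List.isPrefixOf_iff_prefix.mpr hP]
          rw [hb]; rfl
        · by_cases hE : ['E','X','C','E','L'] <+: (c :: r)
          · have hEw : ['E','X','C','E','L'] <+: List.takeWhile pvGood (c :: r) :=
              (pvPrefix_takeWhile pvGood _ _ pvGoodEL).mpr hE
            obtain ⟨t, hw⟩ := hEw
            have hEtr : ['E','X','C','E','L'] <+: pvTrunc ['P','R','O','V','I','S','I','O','N','A','L'] (List.takeWhile pvGood (c :: r)) := by
              refine pvPrefix_trunc _ _ _ ⟨t, hw⟩ ?_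
              intro i hi hcon
              rw [← hw] at hcon
              have hi5 : i < 5 := by simpa using hi
              clear hi
              interval_cases i <;> simp [List.cons_prefix_cons] at hcon
            rw [pvTrunc_eq_nil_of_prefix _ _ hEtr]
            have hb : pvBGo (c :: r) = [] := by
              rw [pvBGo_cons, if_pos]
              simp [List.isPrefixOf_iff_prefix.mpr hE]
            rw [hb]
          · have hPw : ¬ ['P','R','O','V','I','S','I','O','N','A','L'] <+: List.takeWhile pvGood (c :: r) := fun h =>
              hP ((pvPrefix_takeWhile pvGood _ _ pvGoodPL).mp h)
            have hPstep : pvTrunc ['P','R','O','V','I','S','I','O','N','A','L'] (List.takeWhile pvGood (c :: r)) =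
                c :: pvTrunc ['P','R','O','V','I','S','I','O','N','A','L'] (List.takeWhile pvGood r) := by
              rw [htw]
              simp only [pvTrunc]
              rw [if_neg (fun hb => hPw (htw ▸ List.isPrefixOf_iff_prefix.mp hb))]
            rw [hPstep]
            have hEc : ¬ ['E','X','C','E','L'] <+: (c :: pvTrunc ['P','R','O','V','I','S','I','O','N','A','L'] (List.takeWhile pvGood r)) := by
              intro h
              refine hE (List.IsPrefix.trans h ?_)
              exact (List.prefix_cons_inj c).mpr
                (List.IsPrefix.trans (pvTrunc_prefix _ _) (List.takeWhile_prefix pvGood))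
            have hEstep : pvTrunc ['E','X','C','E','L'] (c :: pvTrunc ['P','R','O','V','I','S','I','O','N','A','L'] (List.takeWhile pvGood r)) =
                c :: pvTrunc ['E','X','C','E','L'] (pvTrunc ['P','R','O','V','I','S','I','O','N','A','L'] (List.takeWhile pvGood r)) := by
              simp only [pvTrunc]
              rw [if_neg (fun hb => hEc (List.isPrefixOf_iff_prefix.mp hb))]
            rw [hEstep, ← ih]
            have hbb : pvBGo (c :: r) = c :: pvBGo r := by
              rw [pvBGo_cons, if_neg]
              simp only [Bool.or_eq_true, not_or]
              refine ⟨⟨⟨?_, ?_⟩, ?_⟩, ?_⟩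
              · simp [List.isPrefixOf, beq_eq_false_iff_ne.mpr (Ne.symm hbr.1)]
              · simp [List.isPrefixOf, beq_eq_false_iff_ne.mpr (Ne.symm hbr.2)]
              · intro hb; exact hP (List.isPrefixOf_iff_prefix.mp hb)
              · intro hb; exact hE (List.isPrefixOf_iff_prefix.mp hb)
            rw [hbb]

-- ===== VERDICT (by name: the statement is the Claim_ definition above) =====
theorem clean_description_for_time_spec : Claim_equal_clean_description_for_time := by
  intro description _
  unfold Spec_clean_description_for_time clean_description_for_time clean_description_for_time_alt
  simp only [List.foldl]
  rw [pvAStep_eq_trunc _ _ (by decide), pvAStep_eq_trunc _ _ (by decide),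
      pvAStep_eq_trunc _ _ (by decide), pvAStep_eq_trunc _ _ (by decide), ← pvBGo_eq]
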